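-- pv_equiv track=rewrite | github.com/NishantKumar1301/Dsa-Pratice-Questions | Leetcode/Problem Of The Day/June 2025/june28.py | maxSubsequence
-- ===== SOURCE A (Python) =====
-- def maxSubsequence(nums, k):
--     """
--     :type nums: List[int]
--     :type k: int
--     :rtype: List[int]
--     """
--     n = len(nums)
--     if n ==k:
--         return nums
--     temp = [(i,val) for i,val in enumerate(nums)]
--     temp.sort(key = lambda x:x[1], reverse=True)
--     # Take top k elements, then sort them by index to preserve order
--     temp = sorted(temp[:k],key = lambda x:x[0])
--     ans = [val for idx,val in temp]
--     return ans
-- ===== SOURCE B (Python) =====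
-- def maxSubsequence(nums, k):
--     """
--     :type nums: List[int]
--     :type k: int
--     :rtype: List[int]
--     """
--     n = len(nums)
--     if n == k:
--         return nums
--     if k <= 0:
--         return []
--     if n <= k:
--         return list(nums)
--     # threshold = k-th largest value; one pass keeps every value above it
--     # and the earliest occurrences of the threshold value that still fit.
--     thresh = sorted(nums, reverse=True)[k - 1]
--     budget = k - sum(1 for v in nums if v > thresh)
--     ans = []
--     for x in nums:
--         if x > thresh:
--             ans.append(x)
--         elif x == thresh and budget > 0:
--             ans.append(x)
--             budget -= 1
--     return ans
-- ===== Notes on version B (the rewrite author's own statement) =====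
-- stated objective: faster
-- what changed: B replaces A's two sorts of (index,value) pairs by one plain sort of the values: it reads the k-th largest value as a threshold, counts how many values exceed it, and makes a single pass that keeps every value above the threshold plus the earliest occurrences of the threshold value that still fit.
-- intended difference: On k < 0 with len(nums) + k > 0, A's negative slice temp[:k] accidentally returns the top len(nums)+k values (e.g. A([1,2],-1) = [2]); B returns [], the intended reading of 'the k largest elements' for a nonpositive k. — e.g. on maxSubsequence([1, 2], -1): A returns [2], B returns []
import Mathlib
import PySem

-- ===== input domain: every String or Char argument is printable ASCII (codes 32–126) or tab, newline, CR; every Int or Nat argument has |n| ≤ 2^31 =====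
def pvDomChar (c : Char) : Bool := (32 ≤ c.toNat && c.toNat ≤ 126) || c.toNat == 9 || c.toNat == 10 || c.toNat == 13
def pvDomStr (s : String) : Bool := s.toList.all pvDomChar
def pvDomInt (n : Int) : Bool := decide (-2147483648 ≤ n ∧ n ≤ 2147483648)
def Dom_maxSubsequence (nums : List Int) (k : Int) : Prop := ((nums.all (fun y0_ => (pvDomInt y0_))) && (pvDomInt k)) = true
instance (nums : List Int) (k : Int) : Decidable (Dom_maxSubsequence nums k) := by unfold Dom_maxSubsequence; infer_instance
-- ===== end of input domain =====

-- B replaces A's two sorts of (index, value) pairs by one plain sort of the values: the k-th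
-- largest value becomes a threshold, and a single pass keeps every larger value plus the
-- earliest occurrences of the threshold value (objective: faster by a constant factor).

-- ===== PORT A =====
def maxSubsequence (nums : List Int) (k : Int) : List Int :=
  let n : Int := nums.length
  if n = k then nums
  else
    let temp := PySem.List.enumerate nums
    let temp1 := PySem.List.sorted temp (fun x => x.2) true
    let temp2 := PySem.List.sorted (PySem.List.slice temp1 none (some k)) (fun x => x.1) false
    temp2.map (fun p => p.2)

-- ===== PORT B =====
def maxSubsequence_alt (nums : List Int) (k : Int) : List Int :=
  let n : Int := nums.length
  if n = k then nums
  else if k ≤ 0 then []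
  else if n ≤ k then nums
  else
    -- here 0 < k < len nums, so the Python index [k - 1] is always in range
    let thresh := ((PySem.List.pyGet? (PySem.List.sorted nums (fun x => x) true) (k - 1)).getD 0)
    let budget := k - nums.foldl (fun acc v => if thresh < v then acc + 1 else acc) 0
    (nums.foldl (fun st x =>
        if thresh < x then (st.1 ++ [x], st.2)
        else if x = thresh ∧ 0 < st.2 then (st.1 ++ [x], st.2 - 1)
        else st) (([] : List Int), budget)).1

-- ===== PRECONDITION & SPEC =====
-- On negative k with len(nums) + k > 0, A's slice temp[:k] accidentally keeps the top
-- len(nums)+k values instead of k values; B returns [] (no elements for a nonpositive k),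
-- which is the intended reading of "the k largest elements".
def D_maxSubsequence (nums : List Int) (k : Int) : Prop := k < 0 ∧ 0 < (nums.length : Int) + k
instance (nums : List Int) (k : Int) : Decidable (D_maxSubsequence nums k) := by unfold D_maxSubsequence; infer_instance
def Spec_maxSubsequence (nums : List Int) (k : Int) (out : List Int) : Prop := ¬ D_maxSubsequence nums k → out = maxSubsequence_alt nums k
instance (nums : List Int) (k : Int) (out : List Int) : Decidable (Spec_maxSubsequence nums k out) := by unfold Spec_maxSubsequence; infer_instance
def pvDiffWitness_maxSubsequence : List Int × Int := ([1, 2], -1)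
def pvDiffWitnessOut_maxSubsequence : (List Int) × (List Int) := ([2], [])

-- ===== CLAIM (what is proved, stated in full; the proofs are below) =====
def Claim_unchanged_maxSubsequence : Prop := ∀ (nums : List Int) (k : Int), Dom_maxSubsequence nums k → Spec_maxSubsequence nums k (maxSubsequence nums k)
def Claim_changed_maxSubsequence : Prop := Dom_maxSubsequence (pvDiffWitness_maxSubsequence.1) (pvDiffWitness_maxSubsequence.2) ∧ D_maxSubsequence (pvDiffWitness_maxSubsequence.1) (pvDiffWitness_maxSubsequence.2) ∧ maxSubsequence (pvDiffWitness_maxSubsequence.1) (pvDiffWitness_maxSubsequence.2) = pvDiffWitnessOut_maxSubsequence.1 ∧ maxSubsequence_alt (pvDiffWitness_maxSubsequence.1) (pvDiffWitness_maxSubsequence.2) = pvDiffWitnessOut_maxSubsequence.2 ∧ pvDiffWitnessOut_maxSubsequence.1 ≠ pvDiffWitnessOut_maxSubsequence.2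
def Claim_exact_maxSubsequence : Prop := ∀ (nums : List Int) (k : Int), Dom_maxSubsequence nums k → D_maxSubsequence nums k → maxSubsequence nums k ≠ maxSubsequence_alt nums k

-- ===== LEMMAS AND PROOFS =====

-- strict order in which A's first (stable, reverse) sort arranges the (index, value) pairs
def PairLex (a b : Int × Int) : Prop := b.2 < a.2 ∨ (a.2 = b.2 ∧ a.1 < b.1)

-- selection recursion shared by the proofs (Nat budget)
def gsel (thresh : Int) : List Int → Nat → List Int
  | [], _ => []
  | x :: t, b =>
    if thresh < x then x :: gsel thresh t b
    else if x = thresh ∧ 0 < b then x :: gsel thresh t (b - 1)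
    else gsel thresh t b

-- selection recursion matching B's loop (Int budget)
def isel (thresh : Int) : List Int → Int → List Int
  | [], _ => []
  | x :: t, b =>
    if thresh < x then x :: isel thresh t b
    else if x = thresh ∧ 0 < b then x :: isel thresh t (b - 1)
    else isel thresh t b

theorem enum_fst_ge (xs : List Int) : ∀ (s : Int) (p : Int × Int), p ∈ PySem.List.enumerate xs s → s ≤ p.1 := by
  induction xs with
  | nil => intro s p hp; simp [PySem.List.enumerate] at hp
  | cons x t ih =>
    intro s p hp
    rw [PySem.List.enumerate_cons] at hp
    rcases List.mem_cons.mp hp with h | h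
    · subst h; simp
    · have := ih (s + 1) p h; omega

theorem enum_pairwise_fst (xs : List Int) (s : Int) :
    (PySem.List.enumerate xs s).Pairwise (fun a b => a.1 < b.1) := by
  induction xs generalizing s with
  | nil => simp [PySem.List.enumerate]
  | cons x t ih =>
    rw [PySem.List.enumerate_cons]
    refine List.Pairwise.cons ?_ (ih (s + 1))
    intro b hb
    have := enum_fst_ge t (s + 1) b hb
    simpa using by omega

theorem enum_mem_get (xs : List Int) : ∀ (s : Int) (p : Int × Int), p ∈ PySem.List.enumerate xs s →
    ∃ (m : Nat) (h : m < xs.length), p.1 = s + (m : Int) ∧ p.2 = xs[m] := by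
  induction xs with
  | nil => intro s p hp; simp [PySem.List.enumerate] at hp
  | cons x t ih =>
    intro s p hp
    rw [PySem.List.enumerate_cons] at hp
    rcases List.mem_cons.mp hp with h | h
    · subst h; exact ⟨0, by simp, by simp⟩
    · obtain ⟨m, hm, h1, h2⟩ := ih (s + 1) p h
      exact ⟨m + 1, by simpa using hm, by push_cast; omega, by simpa using h2⟩

theorem enum_countP_eqlt (c : Int) : ∀ (ys : List Int) (s : Int) (m : Nat),
    (PySem.List.enumerate ys s).countP (fun q => decide (q.2 = c) && decide (q.1 < s + (m : Int)))
      = (ys.take m).countP (fun v => decide (v = c)) := by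
  intro ys
  induction ys with
  | nil => intro s m; simp [PySem.List.enumerate]
  | cons x t ih =>
    intro s m
    rw [PySem.List.enumerate_cons]
    match m with
    | 0 =>
      simp only [List.take_zero, List.countP_nil]
      have hz : (PySem.List.enumerate t (s + 1)).countP
          (fun q => decide (q.2 = c) && decide (q.1 < s + ((0 : Nat) : Int))) = 0 := by
        apply List.countP_eq_zero.mpr
        intro q hq
        have := enum_fst_ge t (s + 1) q hq
        simp only [Bool.and_eq_true, decide_eq_true_eq]
        rintro ⟨-, h⟩
        simp at h
        omega
      rw [List.countP_cons, hz]
      simp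
    | m' + 1 =>
      rw [List.countP_cons, List.take_succ_cons, List.countP_cons]
      have harith : s + ((m' + 1 : Nat) : Int) = (s + 1) + (m' : Int) := by push_cast; omega
      rw [harith, ih (s + 1) m']
      have hlt : ((s : Int), x).1 < (s + 1) + (m' : Int) := by simp; omega
      have : (decide ((s, x).2 = c) && decide ((s, x).1 < (s + 1) + (m' : Int))) = decide (x = c) := by
        simp [hlt]
      rw [this]

theorem insertBy_lex (x : Int × Int) : ∀ (acc : List (Int × Int)), acc.Pairwise PairLex →
    (∀ a ∈ acc, a.1 < x.1) →
    (PySem.List.insertBy (fun a b => decide (b.2 < a.2)) x acc).Pairwise PairLex := by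
  intro acc
  induction acc with
  | nil => intro _ _; simp [PySem.List.insertBy, PairLex]
  | cons y ys ih =>
    intro hp hf
    rcases List.pairwise_cons.mp hp with ⟨hy, hys⟩
    by_cases hxy : y.2 < x.2
    · have hstep : PySem.List.insertBy (fun a b => decide (b.2 < a.2)) x (y :: ys) = x :: y :: ys := by
        simp [PySem.List.insertBy, hxy]
      rw [hstep]
      refine List.pairwise_cons.mpr ⟨?_, hp⟩
      intro b hb
      rcases List.mem_cons.mp hb with rfl | hbys
      · exact Or.inl hxy
      · rcases hy b hbys with h | ⟨h1, h2⟩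
        · exact Or.inl (by omega)
        · exact Or.inl (by omega)
    · have hstep : PySem.List.insertBy (fun a b => decide (b.2 < a.2)) x (y :: ys)
          = y :: PySem.List.insertBy (fun a b => decide (b.2 < a.2)) x ys := by
        simp [PySem.List.insertBy, hxy]
      rw [hstep]
      refine List.pairwise_cons.mpr ⟨?_, ih hys (fun a ha => hf a (List.mem_cons_of_mem y ha))⟩
      intro b hb
      rcases (PySem.List.mem_insertBy ..).mp hb with rfl | hbys
      · rcases lt_or_eq_of_le (not_lt.mp hxy) with h | h
        · exact Or.inl h
        · exact Or.inr ⟨h.symm, hf y List.mem_cons_self⟩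
      · exact hy b hbys

theorem foldl_insertBy_lex : ∀ (xs acc : List (Int × Int)), acc.Pairwise PairLex →
    xs.Pairwise (fun a b => a.1 < b.1) → (∀ a ∈ acc, ∀ b ∈ xs, a.1 < b.1) →
    (xs.foldl (fun acc x => PySem.List.insertBy (fun a b => decide (b.2 < a.2)) x acc) acc).Pairwise PairLex := by
  intro xs
  induction xs with
  | nil => intro acc hp _ _; simpa using hp
  | cons x t ih =>
    intro acc hp hx hcross
    rw [List.foldl_cons]
    rcases List.pairwise_cons.mp hx with ⟨hxh, hxt⟩
    apply ih
    · exact insertBy_lex x acc hp (fun a ha => hcross a ha x List.mem_cons_self)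
    · exact hxt
    · intro a ha b hb
      rcases (PySem.List.mem_insertBy ..).mp ha with rfl | haacc
      · exact hxh b hb
      · exact hcross a haacc b (List.mem_cons_of_mem x hb)

theorem sorted_rev_lex (xs : List (Int × Int)) (h : xs.Pairwise (fun a b => a.1 < b.1)) :
    (PySem.List.sorted xs (fun p => p.2) true).Pairwise PairLex := by
  rw [PySem.List.sorted_rev_eq_foldl_insertBy]
  exact foldl_insertBy_lex xs [] (by simp) h (by simp)

theorem mem_take_iff_rank {α : Type} (r : α → α → Bool) :
    ∀ (l : List α), l.Pairwise (fun a b => r a b = true) →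
    (∀ a b, r a b = true → r b a = false) → l.Nodup →
    ∀ (e : α), e ∈ l → ∀ (k : Nat), (e ∈ l.take k ↔ l.countP (fun x => r x e) < k) := by
  intro l
  induction l with
  | nil => intro _ _ _ e he; simp at he
  | cons a t ih =>
    intro hp hasym hnd e he k
    rcases List.pairwise_cons.mp hp with ⟨ha, ht⟩
    rcases List.nodup_cons.mp hnd with ⟨hna, hndt⟩
    rcases List.mem_cons.mp he with rfl | het
    · have hcnt : (e :: t).countP (fun x => r x e) = 0 := by
        apply List.countP_eq_zero.mpr
        intro b hb
        rcases List.mem_cons.mp hb with rfl | hbt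
        · intro hre
          have h2 := hasym b b hre
          rw [hre] at h2
          exact absurd h2 (by decide)
        · simp [hasym e b (ha b hbt)]
      rw [hcnt]
      constructor
      · intro hmem
        match k with
        | 0 => simp at hmem
        | k' + 1 => omega
      · intro hk
        match k with
        | 0 => omega
        | k' + 1 => simp [List.take_succ_cons]
    · have hne : e ≠ a := fun h => hna (h ▸ het)
      have hra : r a e = true := ha e het
      have hcnt : (a :: t).countP (fun x => r x e) = t.countP (fun x => r x e) + 1 := by
        rw [List.countP_cons]; simp [hra]
      rw [hcnt]
      match k with
      | 0 => exact iff_of_false (by simp) (by omega)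
      | k' + 1 =>
        rw [List.take_succ_cons]
        constructor
        · intro hmem
          rcases List.mem_cons.mp hmem with h | h
          · exact absurd h hne
          · have := (ih ht hasym hndt e het k').mp h
            omega
        · intro hk
          have := (ih ht hasym hndt e het k').mpr (by omega)
          exact List.mem_cons_of_mem a this

theorem countP_or_disjoint {α : Type} (p q : α → Bool) :
    ∀ (l : List α), (∀ a ∈ l, ¬(p a = true ∧ q a = true)) →
    l.countP (fun a => p a || q a) = l.countP p + l.countP q := by
  intro l
  induction l with
  | nil => simp
  | cons a t ih =>
    intro hd
    have ht := ih (fun b hb => hd b (List.mem_cons_of_mem a hb))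
    have ha := hd a List.mem_cons_self
    rw [List.countP_cons, List.countP_cons, List.countP_cons, ht]
    by_cases hp : p a = true <;> by_cases hq : q a = true <;> simp [hp, hq] at * <;> omega

theorem desc_countP_gt (s : List Int) (hp : s.Pairwise (fun a b => b ≤ a))
    (j : Nat) (hj : j < s.length) : s.countP (fun v => decide (s[j] < v)) ≤ j := by
  have hdrop : (s.drop j).countP (fun v => decide (s[j] < v)) = 0 := by
    apply List.countP_eq_zero.mpr
    intro v hv
    simp only [decide_eq_true_eq]
    intro hlt
    rcases List.mem_iff_getElem.mp hv with ⟨i, hi, hvi⟩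
    rw [List.getElem_drop] at hvi
    subst hvi
    match i with
    | 0 =>
      simp only [Nat.add_zero] at hlt
      exact lt_irrefl _ hlt
    | i' + 1 =>
      have hle := (List.pairwise_iff_getElem.mp hp) j (j + (i' + 1))
        (by omega) (by simp [List.length_drop] at hi; omega) (by omega)
      exact absurd hlt (not_lt.mpr hle)
  calc s.countP (fun v => decide (s[j] < v))
      = (s.take j ++ s.drop j).countP (fun v => decide (s[j] < v)) := by
        rw [List.take_append_drop]
    _ = (s.take j).countP (fun v => decide (s[j] < v))
        + (s.drop j).countP (fun v => decide (s[j] < v)) := List.countP_append ..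
    _ ≤ j := by
        rw [hdrop]
        have h1 : (s.take j).countP (fun v => decide (s[j] < v)) ≤ (s.take j).length :=
          List.countP_le_length ..
        have h2 : (s.take j).length ≤ j := by rw [List.length_take]; omega
        omega

theorem desc_countP_ge (s : List Int) (hp : s.Pairwise (fun a b => b ≤ a))
    (j : Nat) (hj : j < s.length) : j + 1 ≤ s.countP (fun v => decide (s[j] ≤ v)) := by
  have htake : (s.take (j + 1)).countP (fun v => decide (s[j] ≤ v)) = (s.take (j + 1)).length := by
    apply List.countP_eq_length.mpr
    intro v hv
    simp only [decide_eq_true_eq]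
    rcases List.mem_iff_getElem.mp hv with ⟨i, hi, hvi⟩
    rw [List.getElem_take] at hvi
    subst hvi
    have hi' : i < j + 1 := by simp [List.length_take] at hi; omega
    rcases Nat.lt_or_ge i j with h | h
    · exact (List.pairwise_iff_getElem.mp hp) i j (by omega) hj h
    · have : i = j := by omega
      subst this
      exact le_refl _
  have hlen : (s.take (j + 1)).length = j + 1 := by rw [List.length_take]; omega
  calc j + 1 = (s.take (j + 1)).countP (fun v => decide (s[j] ≤ v)) := by rw [htake, hlen]
    _ ≤ (s.take (j + 1) ++ s.drop (j + 1)).countP (fun v => decide (s[j] ≤ v)) := by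
        rw [List.countP_append]; omega
    _ = s.countP (fun v => decide (s[j] ≤ v)) := by rw [List.take_append_drop]

theorem loop_spec (thresh : Int) : ∀ (ys acc : List Int) (b : Int),
    (ys.foldl (fun st x =>
        if thresh < x then (st.1 ++ [x], st.2)
        else if x = thresh ∧ 0 < st.2 then (st.1 ++ [x], st.2 - 1)
        else st) (acc, b)).1 = acc ++ isel thresh ys b := by
  intro ys
  induction ys with
  | nil => intro acc b; simp [isel]
  | cons x t ih =>
    intro acc b
    rw [List.foldl_cons]
    by_cases h1 : thresh < x
    · simp only [h1, if_pos, isel]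
      rw [ih]
      simp
    · by_cases h2 : x = thresh ∧ 0 < b
      · simp only [isel, if_neg h1, if_pos h2]
        rw [ih]
        simp
      · simp only [isel, if_neg h1, if_neg h2]
        rw [ih]

theorem isel_eq_gsel (thresh : Int) : ∀ (ys : List Int) (b : Int), 0 ≤ b →
    isel thresh ys b = gsel thresh ys b.toNat := by
  intro ys
  induction ys with
  | nil => intro b _; simp [isel, gsel]
  | cons x t ih =>
    intro b hb
    by_cases h1 : thresh < x
    · simp only [isel, gsel, if_pos h1]
      rw [ih b hb]
    · by_cases h2 : x = thresh ∧ 0 < b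
      · obtain ⟨hx2, hb2⟩ := h2
        have h2' : x = thresh ∧ 0 < b.toNat := ⟨hx2, by omega⟩
        simp only [isel, gsel, if_neg h1, if_pos (And.intro hx2 hb2), if_pos h2']
        have hbn : (b - 1).toNat = b.toNat - 1 := by omega
        rw [ih (b - 1) (by omega), hbn]
      · have h2' : ¬(x = thresh ∧ 0 < b.toNat) := by
          rintro ⟨hx, hbn⟩; exact h2 ⟨hx, by omega⟩
        simp only [isel, gsel, if_neg h1, if_neg h2, if_neg h2']
        exact ih b hb

theorem count_foldl (thresh : Int) : ∀ (ys : List Int) (acc : Int),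
    ys.foldl (fun acc v => if thresh < v then acc + 1 else acc) acc
      = acc + (ys.countP (fun v => decide (thresh < v)) : Int) := by
  intro ys
  induction ys with
  | nil => intro acc; simp
  | cons x t ih =>
    intro acc
    rw [List.foldl_cons, List.countP_cons, ih]
    by_cases h : thresh < x
    · simp only [h, decide_true]
      push_cast
      ring
    · simp only [h, decide_false]
      push_cast
      ring

theorem filter_g (thresh : Int) (B0 : Nat) (nums : List Int) :
    ∀ (ys pre : List Int), nums = pre ++ ys →
    ((PySem.List.enumerate ys (pre.length : Int)).filter
        (fun p => decide (thresh < p.2) ||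
          (decide (p.2 = thresh) && decide ((nums.take p.1.toNat).countP (fun v => decide (v = thresh)) < B0)))).map (fun p => p.2)
      = gsel thresh ys (B0 - pre.countP (fun v => decide (v = thresh))) := by
  intro ys
  induction ys with
  | nil => intro pre h; simp [PySem.List.enumerate, gsel]
  | cons x t ih =>
    intro pre hsplit
    have htake : nums.take pre.length = pre := by
      rw [hsplit]
      exact List.take_left ..
    have hpre1 : nums = (pre ++ [x]) ++ t := by rw [hsplit]; simp
    have hlen1 : (((pre ++ [x]).length : Nat) : Int) = (pre.length : Int) + 1 := by simp
    have hih := ih (pre ++ [x]) hpre1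
    rw [hlen1] at hih
    have hcntapp : (pre ++ [x]).countP (fun v => decide (v = thresh))
        = pre.countP (fun v => decide (v = thresh)) + (if x = thresh then 1 else 0) := by
      rw [List.countP_append]
      by_cases hx : x = thresh <;> simp [hx]
    rw [PySem.List.enumerate_cons, List.filter_cons]
    by_cases h1 : thresh < x
    · have hx : ¬ (x = thresh) := by omega
      rw [if_pos (by simp [h1]), List.map_cons, hih, hcntapp, if_neg hx]
      have hg : gsel thresh (x :: t) (B0 - pre.countP (fun v => decide (v = thresh)))
          = x :: gsel thresh t (B0 - pre.countP (fun v => decide (v = thresh))) := by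
        simp only [gsel]
        rw [if_pos h1]
      rw [hg]
      simp
    · by_cases hx : x = thresh
      · by_cases hlt : pre.countP (fun v => decide (v = thresh)) < B0
        · rw [if_pos (by simp [htake, hx, hlt]), List.map_cons, hih, hcntapp, if_pos hx]
          have harr : B0 - (pre.countP (fun v => decide (v = thresh)) + 1)
              = B0 - pre.countP (fun v => decide (v = thresh)) - 1 := by omega
          rw [harr]
          have hg : gsel thresh (x :: t) (B0 - pre.countP (fun v => decide (v = thresh)))
              = x :: gsel thresh t (B0 - pre.countP (fun v => decide (v = thresh)) - 1) := by
            simp only [gsel]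
            rw [if_neg h1, if_pos ⟨hx, by omega⟩]
          rw [hg]
        · rw [if_neg (by simp [htake, hx, hlt]), hih, hcntapp, if_pos hx]
          have harr : B0 - (pre.countP (fun v => decide (v = thresh)) + 1)
              = B0 - pre.countP (fun v => decide (v = thresh)) := by omega
          rw [harr]
          have hg : gsel thresh (x :: t) (B0 - pre.countP (fun v => decide (v = thresh)))
              = gsel thresh t (B0 - pre.countP (fun v => decide (v = thresh))) := by
            simp only [gsel]
            rw [if_neg h1, if_neg (by rintro ⟨-, hb⟩; omega)]
          rw [hg]
      · rw [if_neg (by simp [hx, h1]), hih, hcntapp, if_neg hx]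
        have hg : gsel thresh (x :: t) (B0 - pre.countP (fun v => decide (v = thresh)))
            = gsel thresh t (B0 - pre.countP (fun v => decide (v = thresh))) := by
          simp only [gsel]
          rw [if_neg h1, if_neg (by rintro ⟨h, -⟩; exact hx h)]
        rw [hg]
        simp

theorem lexB_asym (a b : Int × Int) :
    (decide (b.2 < a.2) || (decide (a.2 = b.2) && decide (a.1 < b.1))) = true →
    (decide (a.2 < b.2) || (decide (b.2 = a.2) && decide (b.1 < a.1))) = false := by
  intro h
  simp only [Bool.or_eq_true, Bool.and_eq_true, decide_eq_true_eq] at h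
  cases hb : (decide (a.2 < b.2) || (decide (b.2 = a.2) && decide (b.1 < a.1))) with
  | false => rfl
  | true =>
    simp only [Bool.or_eq_true, Bool.and_eq_true, decide_eq_true_eq] at hb
    exfalso
    omega

theorem sel_iff (nums : List Int) (thresh : Int) (K C : Nat)
    (hC : C = nums.countP (fun v => decide (thresh < v)))
    (hCle : C < K)
    (hCge : K ≤ nums.countP (fun v => decide (thresh ≤ v)))
    (e : Int × Int) (he : e ∈ PySem.List.enumerate nums 0) :
    ((decide (thresh < e.2) ||
        (decide (e.2 = thresh) &&
          decide ((nums.take e.1.toNat).countP (fun v => decide (v = thresh)) < K - C))) = true)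
      ↔ nums.countP (fun v => decide (e.2 < v))
          + (nums.take e.1.toNat).countP (fun v => decide (v = e.2)) < K := by
  obtain ⟨m, hm, hm1, hm2⟩ := enum_mem_get nums 0 e he
  have hmnat : e.1.toNat = m := by omega
  have hEcnt : (nums.take e.1.toNat).countP (fun v => decide (v = e.2))
      < nums.countP (fun v => decide (v = e.2)) := by
    rw [hmnat]
    conv_rhs => rw [← List.take_append_drop m nums]
    rw [List.countP_append, List.drop_eq_getElem_cons hm, List.countP_cons]
    simp [hm2]
  by_cases h1 : thresh < e.2
  · simp only [h1, decide_true, Bool.true_or, true_iff]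
    have hsum : nums.countP (fun v => decide (e.2 < v)) + nums.countP (fun v => decide (v = e.2))
        ≤ C := by
      rw [← countP_or_disjoint (fun v => decide (e.2 < v)) (fun v => decide (v = e.2)) nums
          (by intro a _; simp; omega), hC]
      apply List.countP_mono_left
      intro v _ hv
      simp at hv ⊢
      omega
    omega
  · by_cases h2 : e.2 = thresh
    · simp only [h2, lt_self_iff_false, decide_false, Bool.false_or, decide_true,
        Bool.true_and, decide_eq_true_eq]
      rw [← hC]
      omega
    · have hge : nums.countP (fun v => decide (thresh ≤ v))
          ≤ nums.countP (fun v => decide (e.2 < v)) := by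
        apply List.countP_mono_left
        intro v _ hv
        simp at hv ⊢
        omega
      exact iff_of_false (by simp [h1, h2]) (by omega)

theorem main_eq (nums : List Int) (k : Int) (hnd : ¬ D_maxSubsequence nums k) :
    maxSubsequence nums k = maxSubsequence_alt nums k := by
  unfold D_maxSubsequence at hnd
  simp only [maxSubsequence, maxSubsequence_alt]
  by_cases hnk : (nums.length : Int) = k
  · rw [if_pos hnk, if_pos hnk]
  · rw [if_neg hnk, if_neg hnk]
    have hlen1 : (PySem.List.sorted (PySem.List.enumerate nums 0) (fun x => x.2) true).length
        = nums.length := by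
      rw [PySem.List.length_sorted, PySem.List.length_enumerate]
    by_cases hk0 : k ≤ 0
    · rw [if_pos hk0]
      have hsl : PySem.List.slice
          (PySem.List.sorted (PySem.List.enumerate nums 0) (fun x => x.2) true) none (some k) = [] := by
        rcases lt_or_eq_of_le hk0 with hklt | hkeq
        · have hk' : k = -((k.natAbs : Nat) : Int) := by omega
          rw [hk', PySem.List.slice_to_neg_natCast _ k.natAbs (by omega)]
          have h0 : (PySem.List.sorted (PySem.List.enumerate nums 0) (fun x => x.2) true).length
              - k.natAbs = 0 := by
            rw [hlen1]
            omega
          rw [h0, List.take_zero]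
        · subst hkeq
          rw [PySem.List.slice_to _ (by omega)]
          simp
      rw [hsl]
      rfl
    · rw [if_neg hk0]
      by_cases hnk2 : (nums.length : Int) ≤ k
      · rw [if_pos hnk2]
        have hsl : PySem.List.slice
            (PySem.List.sorted (PySem.List.enumerate nums 0) (fun x => x.2) true) none (some k)
            = PySem.List.sorted (PySem.List.enumerate nums 0) (fun x => x.2) true := by
          rw [PySem.List.slice_to _ (by omega)]
          apply List.take_of_length_le
          rw [hlen1]
          omega
        rw [hsl]
        rw [PySem.List.sorted_eq_of_perm_of_pairwise_lt _ (PySem.List.enumerate nums 0) _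
          (PySem.List.sorted_perm (PySem.List.enumerate nums 0) (fun x => x.2) true).symm
          (enum_pairwise_fst nums 0)]
        exact PySem.List.map_snd_enumerate nums 0
      · rw [if_neg hnk2]
        -- main case: 0 < k < len nums
        have hk1 : 0 < k := by omega
        have hkn : k < (nums.length : Int) := by omega
        set temp := PySem.List.enumerate nums 0 with htempdef
        set temp1 := PySem.List.sorted temp (fun x => x.2) true with htemp1def
        set srt := PySem.List.sorted nums (fun x => x) true with hsrtdef
        have hslen : srt.length = nums.length := PySem.List.length_sorted ..
        set K := k.toNat with hKdef
        set j := (k - 1).toNat with hjdef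
        have hj : j < srt.length := by rw [hslen]; omega
        have hjK : j + 1 = K := by omega
        -- the threshold value computed by B is srt[j]
        have hth : (PySem.List.pyGet? srt (k - 1)).getD 0 = srt[j]'hj := by
          have hcast : k - 1 = ((j : Nat) : Int) := by omega
          rw [hcast, PySem.List.pyGet?_natCast, List.getElem?_eq_getElem hj]
          rfl
        rw [hth]
        set thresh := srt[j]'hj with hthreshdef
        set C := nums.countP (fun v => decide (thresh < v)) with hCdef
        have hpw : srt.Pairwise (fun a b => b ≤ a) :=
          PySem.List.sorted_pairwise_rev nums (fun x => x)
        have hCle : C < K := by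
          have h1 := desc_countP_gt srt hpw j hj
          rw [(PySem.List.sorted_perm nums (fun x => x) true).countP_eq, ← hthreshdef,
            ← hCdef] at h1
          omega
        have hCge : K ≤ nums.countP (fun v => decide (thresh ≤ v)) := by
          have h1 := desc_countP_ge srt hpw j hj
          rw [(PySem.List.sorted_perm nums (fun x => x) true).countP_eq, ← hthreshdef] at h1
          omega
        -- B side reduces to gsel
        have hcnt0 : nums.foldl (fun acc v => if thresh < v then acc + 1 else acc) 0
            = ((C : Nat) : Int) := by
          rw [count_foldl]
          simp [hCdef]
        rw [hcnt0, loop_spec, List.nil_append,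
          isel_eq_gsel thresh nums (k - ((C : Nat) : Int)) (by omega)]
        have hKC : (k - ((C : Nat) : Int)).toNat = K - C := by omega
        rw [hKC]
        -- A side: facts about temp and temp1
        have htpw : temp.Pairwise (fun a b => a.1 < b.1) := enum_pairwise_fst nums 0
        have htnd : temp.Nodup := by
          apply List.Pairwise.imp ?_ htpw
          intro a b hlt heq
          rw [heq] at hlt
          omega
        have ht1perm : temp1.Perm temp := PySem.List.sorted_perm ..
        have ht1nd : temp1.Nodup := ht1perm.symm.nodup htnd
        have ht1lex : temp1.Pairwise PairLex := sorted_rev_lex temp htpw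
        have ht1len : temp1.length = nums.length := by
          rw [htemp1def, PySem.List.length_sorted, PySem.List.length_enumerate]
        -- the slice is take K
        have hsl : PySem.List.slice temp1 none (some k) = temp1.take K := by
          rw [PySem.List.slice_to _ (by omega)]
        rw [hsl]
        -- rank characterisation inside temp1
        have ht1pwB : temp1.Pairwise (fun a b =>
            (fun x e => decide (e.2 < x.2) || (decide (x.2 = e.2) && decide (x.1 < e.1))) a b
              = true) := by
          apply List.Pairwise.imp ?_ ht1lex
          intro a b h
          simp only [Bool.or_eq_true, Bool.and_eq_true, decide_eq_true_eq]
          exact h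
        have hchain : ∀ a ∈ temp, temp1.countP
            (fun x => decide (a.2 < x.2) || (decide (x.2 = a.2) && decide (x.1 < a.1)))
            = nums.countP (fun v => decide (a.2 < v))
              + (nums.take a.1.toNat).countP (fun v => decide (v = a.2)) := by
          intro a ha
          rw [ht1perm.countP_eq]
          rw [countP_or_disjoint (fun x => decide (a.2 < x.2))
            (fun x => decide (x.2 = a.2) && decide (x.1 < a.1)) temp
            (by intro x _; simp; omega)]
          have hfirst : temp.countP (fun x => decide (a.2 < x.2))
              = nums.countP (fun v => decide (a.2 < v)) := by
            have h1 := List.countP_map (p := fun v => decide (a.2 < v))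
              (f := fun (x : Int × Int) => x.2) (l := temp)
            rw [PySem.List.map_snd_enumerate] at h1
            exact h1.symm
          have h0a : (0 : Int) + ((a.1.toNat : Nat) : Int) = a.1 := by
            have := enum_fst_ge nums 0 a ha
            omega
          have hsecond := enum_countP_eqlt a.2 nums 0 a.1.toNat
          rw [h0a] at hsecond
          rw [hfirst, hsecond]
        -- membership in the first k of temp1 equals B's selection predicate
        have hmemiff : ∀ a, a ∈ temp.filter
            (fun p => decide (thresh < p.2) ||
              (decide (p.2 = thresh) &&
                decide ((nums.take p.1.toNat).countP (fun v => decide (v = thresh)) < K - C)))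
            ↔ a ∈ temp1.take K := by
          intro a
          constructor
          · intro haF
            obtain ⟨hat, hselT⟩ := List.mem_filter.mp haF
            have hiff := sel_iff nums thresh K C hCdef hCle hCge a hat
            have ha1 : a ∈ temp1 := (PySem.List.mem_sorted ..).mpr hat
            refine (mem_take_iff_rank _ temp1 ht1pwB (fun x y => lexB_asym x y) ht1nd a ha1 K).mpr ?_
            rw [hchain a hat]
            exact hiff.mp hselT
          · intro hatake
            have ha1 : a ∈ temp1 := List.mem_of_mem_take hatake
            have hat : a ∈ temp := (PySem.List.mem_sorted ..).mp ha1
            have hiff := sel_iff nums thresh K C hCdef hCle hCge a hat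
            have hr := (mem_take_iff_rank _ temp1 ht1pwB (fun x y => lexB_asym x y) ht1nd a ha1 K).mp hatake
            rw [hchain a hat] at hr
            exact List.mem_filter.mpr ⟨hat, hiff.mpr hr⟩
        -- the second sort produces exactly the filtered enumeration
        have hsorted2 : PySem.List.sorted (temp1.take K) (fun x => x.1) false
            = temp.filter (fun p => decide (thresh < p.2) ||
                (decide (p.2 = thresh) &&
                  decide ((nums.take p.1.toNat).countP (fun v => decide (v = thresh)) < K - C))) := by
          apply PySem.List.sorted_eq_of_perm_of_pairwise_lt
          · exact (List.perm_ext_iff_of_nodup (htnd.filter _)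
              ((List.take_sublist K temp1).nodup ht1nd)).mpr hmemiff
          · exact htpw.filter _
        rw [hsorted2]
        -- finish with the shared recursion
        have hfg := filter_g thresh (K - C) nums nums [] (by simp)
        simp only [List.length_nil, Nat.cast_zero, List.countP_nil, Nat.sub_zero] at hfg
        exact hfg


-- ===== VERDICT (by name: the statement is the Claim_ definition above) =====
theorem maxSubsequence_spec : Claim_unchanged_maxSubsequence := by
  intro nums k _ hD
  exact main_eq nums k hD

theorem maxSubsequence_changed : Claim_changed_maxSubsequence := by
  unfold Claim_changed_maxSubsequence; decide

theorem maxSubsequence_tight : Claim_exact_maxSubsequence := by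
  intro nums k _ hD
  unfold D_maxSubsequence at hD
  obtain ⟨hk, hn⟩ := hD
  have hnk : ¬ (nums.length : Int) = k := by omega
  have hBalt : maxSubsequence_alt nums k = [] := by
    simp only [maxSubsequence_alt]
    rw [if_neg hnk, if_pos (by omega)]
  rw [hBalt]
  simp only [maxSubsequence]
  rw [if_neg hnk]
  intro hcontra
  rw [List.map_eq_nil_iff, PySem.List.sorted_eq_nil_iff] at hcontra
  have hk' : k = -((k.natAbs : Nat) : Int) := by omega
  rw [hk', PySem.List.slice_to_neg_natCast _ k.natAbs (by omega)] at hcontra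
  have hlen : (PySem.List.sorted (PySem.List.enumerate nums 0) (fun x => x.2) true).length
      = nums.length := by
    rw [PySem.List.length_sorted, PySem.List.length_enumerate]
  have hlen0 := congrArg List.length hcontra
  rw [List.length_take, hlen] at hlen0
  simp only [List.length_nil] at hlen0
  omega
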